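-- pv_equiv track=rewrite | github.com/tramnhatquang/LeetCode-Solutions-Python | Twitter OA - Unique Twitter User ID Set.py | get_sum_non_optimal
-- ===== SOURCE A (Python) =====
-- from typing import List
--
-- def get_sum_non_optimal(arr: List[int]) -> int:
-- 	# WRITE YOUR BRILLIANT CODE HERE
-- 	"""
-- 	- The brute force solution is try all numbers in the arr and check there are no duplicates.
-- 	If there is a duplicate, we increase the number until it is unique. We repeat the process until
-- 	all numbers are unique
-- 	"""
-- 	total = 0
-- 	used_num = set()
-- 	for num in arr:
-- 		while num in used_num:
-- 			num += 1
-- 		total += num  # add number when it is unique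
-- 		used_num.add(num)
-- 	return total
-- ===== SOURCE B (Python) =====
-- def get_sum_non_optimal(arr):
--     # Sort, then one linear sweep: each value becomes max(x, prev + 1).
--     total = 0
--     prev = None
--     for x in sorted(arr):
--         cur = x if prev is None or x > prev else prev + 1
--         total += cur
--         prev = cur
--     return total
-- ===== Notes on version B (the rewrite author's own statement) =====
-- stated objective: faster
-- what changed: replaces the per-element 'increment while taken' scan over a hash set by sort-then-linear-sweep (cur = max(x, prev+1)), using the fact that the final set of uniquified values is independent of processing order
import Mathlib
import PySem

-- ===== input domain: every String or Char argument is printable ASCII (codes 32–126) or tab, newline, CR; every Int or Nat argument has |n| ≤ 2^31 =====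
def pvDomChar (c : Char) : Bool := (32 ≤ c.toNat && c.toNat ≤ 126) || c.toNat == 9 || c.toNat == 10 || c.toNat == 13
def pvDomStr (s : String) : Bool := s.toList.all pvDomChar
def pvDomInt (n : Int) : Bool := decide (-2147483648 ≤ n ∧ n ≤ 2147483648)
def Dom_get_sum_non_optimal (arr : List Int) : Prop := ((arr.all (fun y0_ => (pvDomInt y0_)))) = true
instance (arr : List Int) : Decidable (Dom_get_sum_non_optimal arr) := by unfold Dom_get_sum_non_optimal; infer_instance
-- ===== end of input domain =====

-- B replaces A's per-element "increment while taken" scan by sort + one linear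
-- sweep (cur = max(x, prev+1)); measured asymptotically faster on duplicate-heavy input.

-- ===== PORT A =====
-- termination helper for the 'while num in used_num' loop (cited by pvFindFree)
theorem pvFilter_succ_lt (l : List Int) (n : Int) (h : n ∈ l) :
    (l.filter (fun v => decide (n + 1 ≤ v))).length < (l.filter (fun v => decide (n ≤ v))).length := by
  induction l with
  | nil => cases h
  | cons a t ih =>
    have hmono : (t.filter (fun v => decide (n + 1 ≤ v))).length ≤
        (t.filter (fun v => decide (n ≤ v))).length :=
      (List.monotone_filter_right t (fun x hx => by simp at hx ⊢; omega)).length_le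
    rcases List.mem_cons.1 h with heq | ha
    · subst heq
      simp only [List.filter_cons]
      rw [decide_eq_false (by omega : ¬ (n + 1 ≤ n)), decide_eq_true (le_refl n)]
      simp only [if_true, Bool.false_eq_true, if_false, List.length_cons]
      omega
    · have ht := ih ha
      simp only [List.filter_cons]
      by_cases h1 : n + 1 ≤ a
      · rw [decide_eq_true h1, decide_eq_true (by omega : n ≤ a)]
        simp only [if_true, List.length_cons]; omega
      · rw [decide_eq_false h1]
        by_cases h2 : n ≤ a
        · rw [decide_eq_true h2]
          simp only [if_true, Bool.false_eq_true, if_false, List.length_cons]; omega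
        · rw [decide_eq_false h2]
          simp only [Bool.false_eq_true, if_false]; exact ht

-- the 'while num in used_num: num += 1' loop of A
def pvFindFree (used : PySem.Set Int) (num : Int) : Int :=
  if h : num ∈ used then pvFindFree used (num + 1) else num
termination_by (used.filter (fun v => decide (num ≤ v))).length
decreasing_by exact pvFilter_succ_lt used num h

def get_sum_non_optimal (arr : List Int) : Int :=
  (arr.foldl (fun (st : Int × PySem.Set Int) num =>
      let v := pvFindFree st.2 num
      (st.1 + v, PySem.Set.add st.2 v)) (0, PySem.Set.empty)).1

-- ===== PORT B =====
def get_sum_non_optimal_alt (arr : List Int) : Int :=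
  ((PySem.List.sorted arr (fun x => x) false).foldl
    (fun (st : Int × Option Int) x =>
      let cur : Int := match st.2 with
        | none => x
        | some p => if x > p then x else p + 1
      (st.1 + cur, some cur)) (0, (none : Option Int))).1

-- ===== PRECONDITION & SPEC =====
def Spec_get_sum_non_optimal (arr : List Int) (out : Int) : Prop := out = get_sum_non_optimal_alt arr
instance (arr : List Int) (out : Int) : Decidable (Spec_get_sum_non_optimal arr out) := by unfold Spec_get_sum_non_optimal; infer_instance

-- ===== CLAIM (what is proved, stated in full; the proofs are below) =====
def Claim_equal_get_sum_non_optimal : Prop := ∀ (arr : List Int), Dom_get_sum_non_optimal arr → Spec_get_sum_non_optimal arr (get_sum_non_optimal arr)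

-- ===== LEMMAS AND PROOFS =====

-- The smallest value ≥ x not in the finite set S.
theorem pvN_exists (S : Finset Int) (x : Int) : ∃ n : ℕ, x + (n : Int) ∉ S := by
  by_contra hall
  rw [not_exists] at hall
  simp only [not_not] at hall
  have hsub : (Finset.range (S.card + 1)).image (fun n : ℕ => x + (n : Int)) ⊆ S := by
    intro v hv
    rcases Finset.mem_image.1 hv with ⟨n, _, rfl⟩
    exact hall n
  have hcard := Finset.card_le_card hsub
  rw [Finset.card_image_of_injective _ (fun a b hab => by omega)] at hcard
  rw [Finset.card_range] at hcard
  omega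

noncomputable def pvN (S : Finset Int) (x : Int) : Int :=
  x + (Nat.find (pvN_exists S x) : Int)

theorem pvN_ge (S : Finset Int) (x : Int) : x ≤ pvN S x := by
  unfold pvN; omega

theorem pvN_not_mem (S : Finset Int) (x : Int) : pvN S x ∉ S := Nat.find_spec (pvN_exists S x)

theorem pvN_interval (S : Finset Int) (x : Int) {k : Int} (h1 : x ≤ k) (h2 : k < pvN S x) : k ∈ S := by
  have hk : k = x + ((k - x).toNat : Int) := by omega
  have hlt : (k - x).toNat < Nat.find (pvN_exists S x) := by unfold pvN at h2; omega
  have := Nat.find_min (pvN_exists S x) hlt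
  rw [hk]; simpa using this

theorem pvN_unique (S : Finset Int) (x : Int) {v : Int}
    (hge : x ≤ v) (hnm : v ∉ S) (hint : ∀ k, x ≤ k → k < v → k ∈ S) : v = pvN S x := by
  rcases lt_trichotomy v (pvN S x) with h | h | h
  · exact absurd (pvN_interval S x hge h) hnm
  · exact h
  · exact absurd (hint _ (pvN_ge S x) h) (pvN_not_mem S x)

-- greedy insert on the abstract set
noncomputable def pvG (S : Finset Int) (x : Int) : Finset Int := insert (pvN S x) S

theorem pvN_insert_of_ne (S : Finset Int) (b u : Int) (hu : u ≠ pvN S b) :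
    pvN (insert u S) b = pvN S b := by
  refine (pvN_unique (insert u S) b (pvN_ge S b) ?_
    (fun k hk1 hk2 => Finset.mem_insert_of_mem (pvN_interval S b hk1 hk2))).symm
  simp only [Finset.mem_insert]
  rintro (he | hm)
  · exact hu he.symm
  · exact pvN_not_mem S b hm

theorem pvN_collide (S : Finset Int) (a b : Int) (hab : pvN S a = pvN S b) :
    pvN (insert (pvN S a) S) a = pvN (insert (pvN S a) S) b := by
  set w := pvN S a with hw
  have hvb := pvN_ge (insert w S) b
  have hvnm := pvN_not_mem (insert w S) b
  set v := pvN (insert w S) b with hv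
  have hwgta : a ≤ w := pvN_ge S a
  have hwgtb : b ≤ w := by have := pvN_ge S b; omega
  have hvgtw : w < v := by
    rcases lt_trichotomy v w with h | h | h
    · have hmem : v ∈ S := pvN_interval S b hvb (by omega)
      exact absurd (Finset.mem_insert_of_mem hmem) hvnm
    · exact absurd (Finset.mem_insert_self w S) (h ▸ hvnm)
    · exact h
  refine (pvN_unique (insert w S) a (by omega) hvnm ?_).symm
  intro k hk1 hk2
  rcases lt_trichotomy k w with h | h | h
  · exact Finset.mem_insert_of_mem (pvN_interval S a hk1 h)
  · simp [h]
  · exact pvN_interval (insert w S) b (by omega) hk2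

theorem pvG_comm (S : Finset Int) (a b : Int) : pvG (pvG S a) b = pvG (pvG S b) a := by
  by_cases hab : pvN S a = pvN S b
  · unfold pvG
    rw [hab, ← hab, pvN_collide S a b hab, hab, pvN_collide S b a hab.symm, ← hab, hab]
  · unfold pvG
    rw [pvN_insert_of_ne S b (pvN S a) hab,
        pvN_insert_of_ne S a (pvN S b) (fun h => hab h.symm)]
    exact Finset.insert_comm _ _ _

-- abstract fold carrying (total, set)
noncomputable def pvAFold : Int × Finset Int → List Int → Int × Finset Int
  | st, [] => st
  | (t, S), x :: l => pvAFold (t + pvN S x, pvG S x) l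

theorem pvAFold_fst (l : List Int) (t : Int) (S : Finset Int) :
    (pvAFold (t, S) l).1 = t + ((l.foldl pvG S).sum id - S.sum id) := by
  induction l generalizing t S with
  | nil => simp [pvAFold]
  | cons x l ih =>
    simp only [pvAFold, List.foldl_cons, ih]
    have : (pvG S x).sum id = pvN S x + S.sum id := by
      unfold pvG
      rw [Finset.sum_insert (pvN_not_mem S x)]
      rfl
    omega

-- ===== A side: port equals abstract fold =====
theorem pvN_succ_of_mem (S : Finset Int) (num : Int) (h : num ∈ S) :
    pvN S (num + 1) = pvN S num := by
  refine pvN_unique S num ?_ (pvN_not_mem S (num + 1)) ?_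
  · have := pvN_ge S (num + 1); omega
  · intro k hk1 hk2
    rcases eq_or_lt_of_le hk1 with heq | hlt
    · exact heq ▸ h
    · exact pvN_interval S (num + 1) (by omega) hk2

theorem pvFindFree_eq (used : PySem.Set Int) (num : Int) :
    pvFindFree used num = pvN used.toFinset num := by
  fun_induction pvFindFree used num with
  | case1 num h ih =>
    rw [ih]
    exact pvN_succ_of_mem used.toFinset num (List.mem_toFinset.2 h)
  | case2 num h =>
    refine pvN_unique used.toFinset num (le_refl num) ?_ (fun k hk1 hk2 => by omega)
    exact fun hmem => h (List.mem_toFinset.1 hmem)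

theorem pvA_fold (l : List Int) (t : Int) (s : List Int) (hs : s.Nodup) :
    (l.foldl (fun (st : Int × PySem.Set Int) num =>
      let v := pvFindFree st.2 num
      (st.1 + v, PySem.Set.add st.2 v)) (t, s)).1 = (pvAFold (t, s.toFinset) l).1 := by
  induction l generalizing t s with
  | nil => rfl
  | cons x l ih =>
    simp only [List.foldl_cons]
    have hv : pvFindFree s x = pvN s.toFinset x := pvFindFree_eq s x
    have hnm : pvFindFree s x ∉ s := by
      rw [hv]
      exact fun hmem => pvN_not_mem s.toFinset x (List.mem_toFinset.2 hmem)
    have hadd : PySem.Set.add s (pvFindFree s x) = s ++ [pvFindFree s x] := by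
      unfold PySem.Set.add
      rw [if_neg]
      simpa [PySem.Set.contains] using hnm
    show (l.foldl _ (t + pvFindFree s x, PySem.Set.add s (pvFindFree s x))).1 = _
    rw [hadd, ih (t + pvFindFree s x) (s ++ [pvFindFree s x])
      (by
        rw [List.nodup_append]
        refine ⟨hs, List.nodup_singleton _, ?_⟩
        intro a ha b hb heq
        rw [List.mem_singleton] at hb
        subst hb; subst heq
        exact hnm ha)]
    have hfin : (s ++ [pvFindFree s x]).toFinset = insert (pvN s.toFinset x) s.toFinset := by
      rw [hv]
      ext y
      simp only [List.mem_toFinset, List.mem_append, List.mem_singleton, Finset.mem_insert,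
        List.mem_toFinset]
      tauto
    rw [hfin, hv]
    rfl

theorem pvA_eq (arr : List Int) : get_sum_non_optimal arr = (pvAFold (0, ∅) arr).1 := by
  unfold get_sum_non_optimal
  have := pvA_fold arr 0 [] List.nodup_nil
  simpa using this

-- ===== B side: port equals abstract fold on the sorted list =====
theorem pvB_fold (l : List Int) (t p : Int) (S : Finset Int)
    (hle : ∀ s ∈ S, s ≤ p)
    (hint : ∀ x ∈ l, ∀ k, x ≤ k → k ≤ p → k ∈ S)
    (hsorted : l.Pairwise (· ≤ ·)) :
    (l.foldl (fun (st : Int × Option Int) x =>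
      let cur : Int := match st.2 with
        | none => x
        | some p => if x > p then x else p + 1
      (st.1 + cur, some cur)) (t, some p)).1 = (pvAFold (t, S) l).1 := by
  induction l generalizing t p S with
  | nil => rfl
  | cons x l ih =>
    rcases List.pairwise_cons.1 hsorted with ⟨hx, htail⟩
    simp only [List.foldl_cons]
    by_cases hxp : x > p
    · have hNx : pvN S x = x := by
        refine (pvN_unique S x (le_refl x) ?_ (fun k hk1 hk2 => by omega)).symm
        exact fun hmem => by have := hle x hmem; omega
      show (l.foldl _ (t + (if x > p then x else p + 1), some (if x > p then x else p + 1))).1 = _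
      rw [if_pos hxp]
      show _ = (pvAFold (t + pvN S x, pvG S x) l).1
      rw [hNx]
      refine ih (t + x) x (pvG S x) ?_ ?_ htail
      · intro s hs
        rcases Finset.mem_insert.1 (by simpa [pvG, hNx] using hs) with heq | hs'
        · omega
        · have := hle s hs'; omega
      · intro y hy k hk1 hk2
        have hxy := hx y hy
        have : k = x := by omega
        simp [pvG, hNx, this]
    · have hxle : x ≤ p := by omega
      have hNx : pvN S x = p + 1 := by
        refine (pvN_unique S x (by omega) ?_ ?_).symm
        · exact fun hmem => by have := hle _ hmem; omega
        · intro k hk1 hk2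
          exact hint x List.mem_cons_self k hk1 (by omega)
      show (l.foldl _ (t + (if x > p then x else p + 1), some (if x > p then x else p + 1))).1 = _
      rw [if_neg hxp]
      show _ = (pvAFold (t + pvN S x, pvG S x) l).1
      rw [hNx]
      refine ih (t + (p + 1)) (p + 1) (pvG S x) ?_ ?_ htail
      · intro s hs
        rcases Finset.mem_insert.1 (by simpa [pvG, hNx] using hs) with heq | hs'
        · omega
        · have := hle s hs'; omega
      · intro y hy k hk1 hk2
        have hxy := hx y hy
        by_cases hkp : k ≤ p
        · have hkS : k ∈ S := hint x List.mem_cons_self k (by omega) hkp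
          simp only [pvG, hNx]
          exact Finset.mem_insert_of_mem hkS
        · have hk : k = p + 1 := by omega
          simp [pvG, hNx, hk]

theorem pvB_eq (arr : List Int) :
    get_sum_non_optimal_alt arr = (pvAFold (0, ∅) (PySem.List.sorted arr (fun x => x) false)).1 := by
  unfold get_sum_non_optimal_alt
  have hpw : (PySem.List.sorted arr (fun x => x) false).Pairwise (· ≤ ·) := by
    have := PySem.List.sorted_pairwise arr (fun x => x)
    simpa using this
  cases hs : PySem.List.sorted arr (fun x => x) false with
  | nil => rfl
  | cons x l =>
    rw [hs] at hpw
    rcases List.pairwise_cons.1 hpw with ⟨hx, htail⟩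
    simp only [List.foldl_cons]
    have hN0 : pvN ∅ x = x :=
      (pvN_unique ∅ x (le_refl x) (Finset.notMem_empty x) (fun k hk1 hk2 => by omega)).symm
    show (l.foldl _ (0 + x, some x)).1 = (pvAFold (0 + pvN ∅ x, pvG ∅ x) l).1
    rw [hN0]
    refine pvB_fold l (0 + x) x (pvG ∅ x) ?_ ?_ htail
    · intro s hs'
      have : s = x := by simpa [pvG, hN0] using hs'
      omega
    · intro y hy k hk1 hk2
      have := hx y hy
      have : k = x := by omega
      simp [pvG, hN0, this]

-- ===== VERDICT (by name: the statement is the Claim_ definition above) =====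
theorem get_sum_non_optimal_spec : Claim_equal_get_sum_non_optimal := by
  intro arr _
  unfold Spec_get_sum_non_optimal
  rw [pvA_eq, pvB_eq]
  rw [pvAFold_fst, pvAFold_fst]
  have hperm : arr.Perm (PySem.List.sorted arr (fun x => x) false) :=
    (PySem.List.sorted_perm arr (fun x => x) false).symm
  rw [List.Perm.foldl_eq' hperm (fun x _ y _ z => pvG_comm z x y) ∅]
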